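-- pv_equiv track=rewrite | github.com/Hoegh07/Project-Euler | Euler759/Euler759.py | Sb2
-- ===== SOURCE A (Python) =====
-- MOD = 1000000007
--
-- memo_Sb = {}
--
-- def Sb(n):
--     if(n in memo_Sb):
--         return memo_Sb[n]
--     if(n == 0):
--         return 0
--     if(n%2 == 0):
--         c = (Sb(n//2)+Sb(n//2-1)+n//2)%MOD
--         memo_Sb[n] = c
--         return c
--     c = (2*Sb(n//2)+n//2+1)%MOD
--     memo_Sb[n] = c
--     return c
--
-- def b(n):
--     y = str(bin(n)[2:])
--     res = 0
--     for i in range(0,len(y)):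
--         if(y[i] == '1'):
--             res += 1
--     return res
--
-- def Sb2(n):
--     if(n in memo_Sb2):
--         return memo_Sb2[n]
--     if(n == 0):
--         return 0
--     if(n == 1):
--         return 1
--     if(n%2 == 0):
--         c = (1+b(n)**2+2*Sb2(n//2-1)+2*Sb(n//2-1)+n//2-1)%MOD
--         memo_Sb2[n] = c
--         return c
--     c = (1+2*Sb2(n//2)+2*Sb(n//2)+n//2)%MOD
--     memo_Sb2[n] = c
--     return c
--
-- memo_Sb2 = {}
-- ===== SOURCE B (Python) =====
-- MOD = 1000000007
--
-- def _Sb(n):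
--     # iterative Sb: walk the pair chain (m, m-1) bottom-up
--     if n <= 0:
--         return 0
--     chain = []
--     m = n
--     while m > 1:
--         chain.append(m)
--         m = m // 2
--     hi, lo = 1, 0  # Sb(1), Sb(0)
--     for m in reversed(chain):
--         if m % 2 == 0:
--             hi, lo = (hi + lo + m // 2) % MOD, (2 * lo + (m - 1) // 2 + 1) % MOD
--         else:
--             hi, lo = (2 * hi + m // 2 + 1) % MOD, (hi + lo + (m - 1) // 2) % MOD
--     return hi
--
-- def Sb2(n):
--     if n == 0:
--         return 0
--     if n == 1:
--         return 1
--     path = []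
--     m = n
--     while m > 1:
--         path.append(m)
--         m = m // 2 - 1 if m % 2 == 0 else m // 2
--     val = m  # base case: Sb2(0)=0 or Sb2(1)=1
--     for m in reversed(path):
--         if m % 2 == 0:
--             val = (1 + bin(m).count('1') ** 2 + 2 * val + 2 * _Sb(m // 2 - 1) + m // 2 - 1) % MOD
--         else:
--             val = (1 + 2 * val + 2 * _Sb(m // 2) + m // 2) % MOD
--     return val
-- ===== Notes on version B (the rewrite author's own statement) =====
-- stated objective: alternative
-- what changed: Sb2's single-path recursion is replaced by an explicit descend-then-fold-back loop (push the path, fold the formula bottom-up), and the memoized binary recursion Sb is replaced by a pure bottom-up iteration over the pair chain (m, m-1); B is pure where A fills module-level memo dicts.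
import Mathlib
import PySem

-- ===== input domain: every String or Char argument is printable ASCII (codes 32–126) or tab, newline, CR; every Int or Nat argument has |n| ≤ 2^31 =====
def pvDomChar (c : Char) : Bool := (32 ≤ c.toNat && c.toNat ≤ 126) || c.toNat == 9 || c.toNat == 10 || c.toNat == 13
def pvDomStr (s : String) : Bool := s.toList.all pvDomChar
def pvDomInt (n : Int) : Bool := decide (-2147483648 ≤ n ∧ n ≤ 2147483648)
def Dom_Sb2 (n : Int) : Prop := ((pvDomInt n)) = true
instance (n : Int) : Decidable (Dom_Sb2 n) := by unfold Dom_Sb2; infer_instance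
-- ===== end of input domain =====

-- B replaces Sb2's linear recursion by an explicit descend-then-fold-back loop and Sb's
-- binary recursion by a bottom-up iteration over the pair chain (m, m-1): objective 'alternative'.
-- A memoizes into module-level dicts (an observable side effect); the equivalence proved here is
-- about the RETURN value only; B is pure.

-- ===== PORT A =====
def MODC : Int := 1000000007

-- Python Sb (memoization elided: within/across calls it returns exactly the pure recursion's value)
def SbA : Nat → Int
  | 0 => 0
  | (n+1) =>
      if (n+1) % 2 == 0 then
        (SbA ((n+1)/2) + SbA ((n+1)/2 - 1) + (((n+1)/2 : Nat) : Int)) % MODC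
      else
        (2 * SbA ((n+1)/2) + (((n+1)/2 : Nat) : Int) + 1) % MODC
decreasing_by all_goals omega

-- bin(n)[2:] as a list of chars (for n = 0 Python gives "0"; we give [] — b's count is 0 either way, exact)
def binDigits : Nat → List Char
  | 0 => []
  | (n+1) => binDigits ((n+1)/2) ++ [if (n+1) % 2 == 1 then '1' else '0']
decreasing_by omega

-- Python b: loop over the binary string accumulating res
def bA (n : Nat) : Int :=
  (binDigits n).foldl (fun res c => if c == '1' then res + 1 else res) 0

def Sb2A : Nat → Int
  | 0 => 0
  | 1 => 1
  | (n+2) =>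
      if (n+2) % 2 == 0 then
        (1 + (bA (n+2))^2 + 2 * Sb2A ((n+2)/2 - 1) + 2 * SbA ((n+2)/2 - 1) + (((n+2)/2 : Nat) : Int) - 1) % MODC
      else
        (1 + 2 * Sb2A ((n+2)/2) + 2 * SbA ((n+2)/2) + (((n+2)/2 : Nat) : Int)) % MODC
decreasing_by all_goals omega

def Sb2 (n : Int) : Int := Sb2A n.toNat   -- Pre_ restricts to n ≥ 0, where toNat is exact

-- ===== PORT B =====
-- bin(m).count('1')
def bB (n : Nat) : Int := ((binDigits n).count '1' : Int)

-- the chain of arguments m, m//2, … pushed by _Sb's while loop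
def chainSb : Nat → List Nat
  | 0 => []
  | 1 => []
  | (n+2) => (n+2) :: chainSb ((n+2)/2)
decreasing_by omega

-- one bottom-up step of _Sb's for loop: (Sb m, Sb (m-1)) from the child pair
def stepSb (p : Int × Int) (m : Nat) : Int × Int :=
  if m % 2 == 0 then
    ((p.1 + p.2 + ((m/2 : Nat) : Int)) % MODC, (2 * p.2 + (((m-1)/2 : Nat) : Int) + 1) % MODC)
  else
    ((2 * p.1 + ((m/2 : Nat) : Int) + 1) % MODC, (p.1 + p.2 + (((m-1)/2 : Nat) : Int)) % MODC)

def SbB (n : Nat) : Int :=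
  if n == 0 then 0
  else ((chainSb n).reverse.foldl stepSb (1, 0)).1

-- next argument of Sb2's single-path recursion
def nextSb2 (m : Nat) : Nat := if m % 2 == 0 then m/2 - 1 else m/2

-- the path pushed by Sb2's while loop
def pathSb2 : Nat → List Nat
  | 0 => []
  | 1 => []
  | (n+2) => (n+2) :: pathSb2 (nextSb2 (n+2))
decreasing_by simp [nextSb2]; split <;> omega

-- where the descent ends (0 or 1)
def baseSb2 : Nat → Nat
  | 0 => 0
  | 1 => 1
  | (n+2) => baseSb2 (nextSb2 (n+2))
decreasing_by simp [nextSb2]; split <;> omega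

-- one bottom-up step of Sb2's for loop
def stepSb2 (val : Int) (m : Nat) : Int :=
  if m % 2 == 0 then
    (1 + (bB m)^2 + 2 * val + 2 * SbB (m/2 - 1) + ((m/2 : Nat) : Int) - 1) % MODC
  else
    (1 + 2 * val + 2 * SbB (m/2) + ((m/2 : Nat) : Int)) % MODC

def Sb2_alt (n : Int) : Int :=
  if n = 0 then 0
  else if n = 1 then 1
  else if n ≤ 1 then n   -- n < 0: the while loop never runs, val stays m = n (literal Python B behaviour)
  else (pathSb2 n.toNat).reverse.foldl stepSb2 ((baseSb2 n.toNat : Nat) : Int)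

-- ===== PRECONDITION & SPEC =====
-- Pre_ excludes n < 0, on which Python A recurses forever (RecursionError)
def Pre_Sb2 (n : Int) : Prop := 0 ≤ n
instance (n : Int) : Decidable (Pre_Sb2 n) := by unfold Pre_Sb2; infer_instance
def pvWitness_Sb2 : Int := (10)
def Spec_Sb2 (n : Int) (out : Int) : Prop := out = Sb2_alt n
instance (n : Int) (out : Int) : Decidable (Spec_Sb2 n out) := by unfold Spec_Sb2; infer_instance

-- ===== CLAIM (what is proved, stated in full; the proofs are below) =====
def Claim_equal_Sb2 : Prop := ∀ (n : Int), Dom_Sb2 n → Pre_Sb2 n → Spec_Sb2 n (Sb2 n)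

-- ===== LEMMAS AND PROOFS =====

theorem foldl_count_char (l : List Char) (acc : Int) :
    l.foldl (fun res c => if c == '1' then res + 1 else res) acc = acc + (l.count '1' : Int) := by
  induction l generalizing acc with
  | nil => simp
  | cons c t ih =>
      simp only [List.foldl_cons]
      rw [ih]
      by_cases h : c = '1'
      · simp [h]
        ring
      · simp [h]

theorem bB_eq_bA (n : Nat) : bB n = bA n := by
  unfold bB bA
  rw [foldl_count_char]
  simp

theorem SbA_even (m : Nat) (h1 : 1 ≤ m) (h2 : m % 2 = 0) :
    SbA m = (SbA (m/2) + SbA (m/2 - 1) + ((m/2 : Nat) : Int)) % MODC := by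
  obtain ⟨k, rfl⟩ : ∃ k, m = k + 1 := ⟨m - 1, by omega⟩
  rw [SbA, if_pos (by simp [h2])]

theorem SbA_odd (m : Nat) (h1 : 1 ≤ m) (h2 : m % 2 = 1) :
    SbA m = (2 * SbA (m/2) + ((m/2 : Nat) : Int) + 1) % MODC := by
  obtain ⟨k, rfl⟩ : ∃ k, m = k + 1 := ⟨m - 1, by omega⟩
  rw [SbA, if_neg (by simp [h2])]

theorem SbB_pair (n : Nat) (h : 1 ≤ n) :
    (chainSb n).reverse.foldl stepSb (1, 0) = (SbA n, SbA (n-1)) := by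
  induction n using Nat.strong_induction_on with
  | _ n ih =>
    match n, h with
    | 1, _ =>
        have : SbA 1 = 1 := by simp [SbA, MODC]
        simp [chainSb, this, SbA]
    | (k+2), _ =>
        have hrec := ih ((k+2)/2) (by omega) (by omega)
        rw [chainSb]
        rw [List.reverse_cons, List.foldl_append, hrec]
        simp only [List.foldl_cons, List.foldl_nil]
        by_cases hpar : (k+2) % 2 = 0
        · -- even
          have h1 : (k+2-1) = k+1 := by omega
          have h3 : (k+1)/2 = (k+2)/2 - 1 := by omega
          have h4 : (k+2-1)/2 = (k+2)/2 - 1 := by omega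
          have hb : ((k+2) % 2 == 0) = true := by simp [hpar]
          rw [SbA_even (k+2) (by omega) hpar, h1, SbA_odd (k+1) (by omega) (by omega)]
          simp only [stepSb, hb, if_true]
          rw [h3, h4]
        · -- odd
          have hpar' : (k+2) % 2 = 1 := by omega
          have h1 : (k+2-1) = k+1 := by omega
          have h3 : (k+1)/2 = (k+2)/2 := by omega
          have h4 : (k+2-1)/2 = (k+2)/2 := by omega
          have hb : ((k+2) % 2 == 0) = false := by simp [hpar']
          rw [SbA_odd (k+2) (by omega) hpar', h1, SbA_even (k+1) (by omega) (by omega)]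
          simp only [stepSb, hb, Bool.false_eq_true, if_false]
          rw [h3, h4]

theorem SbB_eq_SbA (n : Nat) : SbB n = SbA n := by
  cases n with
  | zero => simp [SbB, SbA]
  | succ k =>
      have := SbB_pair (k+1) (by omega)
      simp [SbB, this]

theorem pathSb2_eq (n : Nat) :
    (pathSb2 n).reverse.foldl stepSb2 ((baseSb2 n : Nat) : Int) = Sb2A n := by
  induction n using Nat.strong_induction_on with
  | _ n ih =>
    match n with
    | 0 => simp [pathSb2, baseSb2, Sb2A]
    | 1 => simp [pathSb2, baseSb2, Sb2A]
    | (k+2) =>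
        have hlt : nextSb2 (k+2) < k+2 := by simp [nextSb2]; split <;> omega
        have hrec := ih (nextSb2 (k+2)) hlt
        rw [pathSb2, baseSb2]
        rw [List.reverse_cons, List.foldl_append, hrec]
        simp only [List.foldl_cons, List.foldl_nil]
        by_cases hpar : (k+2) % 2 = 0
        · rw [show Sb2A (k+2) = (1 + (bA (k+2))^2 + 2 * Sb2A ((k+2)/2 - 1) + 2 * SbA ((k+2)/2 - 1)
                + (((k+2)/2 : Nat) : Int) - 1) % MODC from by rw [Sb2A]; simp [hpar]]
          simp [stepSb2, hpar, nextSb2, bB_eq_bA, SbB_eq_SbA]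
        · have hpar' : (k+2) % 2 = 1 := by omega
          rw [show Sb2A (k+2) = (1 + 2 * Sb2A ((k+2)/2) + 2 * SbA ((k+2)/2)
                + (((k+2)/2 : Nat) : Int)) % MODC from by rw [Sb2A]; simp [hpar']]
          simp [stepSb2, hpar', nextSb2, SbB_eq_SbA]

theorem Sb2_alt_eq (n : Int) (h : 0 ≤ n) : Sb2_alt n = Sb2A n.toNat := by
  unfold Sb2_alt
  by_cases h0 : n = 0
  · rw [if_pos h0]; subst h0; simp [Sb2A]
  · by_cases h1 : n = 1
    · rw [if_neg h0, if_pos h1]; subst h1; simp [Sb2A]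
    · have h2 : ¬ n ≤ 1 := by omega
      rw [if_neg h0, if_neg h1, if_neg h2]
      exact pathSb2_eq n.toNat

-- ===== VERDICT (by name: the statement is the Claim_ definition above) =====
theorem Sb2_spec : Claim_equal_Sb2 := by
  intro n _ hpre
  unfold Spec_Sb2 Sb2
  rw [Sb2_alt_eq n hpre]
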